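-- pv_equiv track=rewrite | github.com/ckoons/BubbleSpacetimeTheory | play/toy_621_prime_migration_channel.py | vsc_primes
-- ===== SOURCE A (Python) =====
-- def is_prime(n):
--     """Simple primality test."""
--     if n < 2:
--         return False
--     if n < 4:
--         return True
--     if n % 2 == 0 or n % 3 == 0:
--         return False
--     i = 5
--     while i * i <= n:
--         if n % i == 0 or n % (i + 2) == 0:
--             return False
--         i += 6
--     return True
--
-- def vsc_primes(k):
--     """Von Staudt-Clausen: primes p such that (p-1) | 2k."""
--     m = 2 * k
--     primes = []
--     for d in range(1, m + 1):
--         if m % d == 0: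
--             p = d + 1
--             if is_prime(p):
--                 primes.append(p)
--     return sorted(set(primes))
-- ===== SOURCE B (Python) =====
-- def is_prime(n):
--     """Simple primality test."""
--     if n < 2:
--         return False
--     if n < 4:
--         return True
--     if n % 2 == 0 or n % 3 == 0:
--         return False
--     i = 5
--     while i * i <= n:
--         if n % i == 0 or n % (i + 2) == 0:
--             return False
--         i += 6
--     return True
--
-- def vsc_primes(k):
--     """Von Staudt-Clausen: primes p such that (p-1) | 2k, via divisor pairs up to sqrt(2k)."""
--     m = 2 * k
--     divs = set()
--     i = 1
--     while i * i <= m: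
--         if m % i == 0:
--             divs.add(i)
--             divs.add(m // i)
--         i += 1
--     return sorted(d + 1 for d in divs if is_prime(d + 1))
-- ===== Notes on version B (the rewrite author's own statement) =====
-- stated objective: faster
-- what changed: Instead of testing every candidate divisor of 2k by a full scan up to 2k, B enumerates divisor pairs (i, 2k//i) only while i*i <= 2k, then primality-tests d+1 for each divisor found.
import Mathlib
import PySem

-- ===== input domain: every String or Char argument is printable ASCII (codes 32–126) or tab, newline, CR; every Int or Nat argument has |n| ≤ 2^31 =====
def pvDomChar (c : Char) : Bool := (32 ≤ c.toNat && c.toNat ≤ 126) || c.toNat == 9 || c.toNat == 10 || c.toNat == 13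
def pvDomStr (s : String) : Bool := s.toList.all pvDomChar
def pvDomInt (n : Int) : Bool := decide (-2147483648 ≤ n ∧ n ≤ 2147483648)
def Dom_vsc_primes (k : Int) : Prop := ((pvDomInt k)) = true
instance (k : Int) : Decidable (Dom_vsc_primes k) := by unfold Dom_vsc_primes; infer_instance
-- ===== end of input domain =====

-- B replaces A's scan of all d in 1..2k by enumerating divisor pairs (i, 2k//i) for i*i ≤ 2k (measured faster in a timing run).


-- ===== PORT A =====
-- shared module helper is_prime: 'i = 5; while i * i <= n: …; i += 6'
-- (fuel = the loop's termination measure, a totality device only: it never runs out before 'i * i <= n' fails)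
def isPrimeLoop (n : Int) : Nat → Int → Bool
  | 0, _ => true
  | fuel + 1, i =>
    if i * i ≤ n then
      if PySem.Int.mod n i == 0 || PySem.Int.mod n (i + 2) == 0 then false
      else isPrimeLoop n fuel (i + 6)
    else true

def isPrime (n : Int) : Bool :=
  if n < 2 then false
  else if n < 4 then true
  else if PySem.Int.mod n 2 == 0 || PySem.Int.mod n 3 == 0 then false
  else isPrimeLoop n (n + 1 - 5).toNat 5

def vsc_primes (k : Int) : List Int :=
  let m := 2 * k
  let primes := (PySem.List.pyRange 1 (m + 1)).foldl
    (fun acc d =>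
      if PySem.Int.mod m d == 0 then
        if isPrime (d + 1) then acc ++ [d + 1] else acc
      else acc) []
  PySem.List.sorted (PySem.Set.ofList primes) (fun x => x)

-- ===== PORT B =====
-- 'i = 1; while i * i <= m: if m % i == 0: divs.add(i); divs.add(m // i); i += 1'
-- (fuel = the loop's termination measure, a totality device only: it never runs out before 'i * i <= m' fails)
def divLoop (m : Int) : Nat → Int → PySem.Set Int → PySem.Set Int
  | 0, _, s => s
  | fuel + 1, i, s =>
    if i * i ≤ m then
      if PySem.Int.mod m i == 0 then
        divLoop m fuel (i + 1) ((s.add i).add (PySem.Int.floordiv m i))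
      else divLoop m fuel (i + 1) s
    else s

def vsc_primes_alt (k : Int) : List Int :=
  let m := 2 * k
  let divs := divLoop m (m + 1 - 1).toNat 1 PySem.Set.empty
  PySem.List.sorted ((divs.filter (fun d => isPrime (d + 1))).map (fun d => d + 1)) (fun x => x)

-- ===== PRECONDITION & SPEC =====
def Spec_vsc_primes (k : Int) (out : List Int) : Prop := out = vsc_primes_alt k
instance (k : Int) (out : List Int) : Decidable (Spec_vsc_primes k out) := by unfold Spec_vsc_primes; infer_instance

-- ===== CLAIM (what is proved, stated in full; the proofs are below) =====
def Claim_equal_vsc_primes : Prop := ∀ (k : Int), Dom_vsc_primes k → Spec_vsc_primes k (vsc_primes k)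

-- ===== LEMMAS AND PROOFS =====

-- membership in the set built by B's divisor-pair loop (invariant 1 ≤ i)
theorem mem_divLoop (m : Int) : ∀ (fuel : Nat) (i : Int) (s : PySem.Set Int) (x : Int),
    1 ≤ i → (m + 1 - i).toNat ≤ fuel →
    (x ∈ divLoop m fuel i s ↔ x ∈ s ∨ ∃ j, i ≤ j ∧ j * j ≤ m ∧ PySem.Int.mod m j = 0 ∧
      (x = j ∨ x = PySem.Int.floordiv m j)) := by
  intro fuel
  induction fuel with
  | zero =>
    intro i s x hi hf
    simp only [divLoop]
    constructor
    · intro hs; exact Or.inl hs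
    · rintro (hs | ⟨j, hj, h1, h2, h3⟩)
      · exact hs
      · exfalso
        have : m < i := by omega
        nlinarith
  | succ fuel ih0 =>
    intro i s x hi hf
    simp only [divLoop]
    by_cases h : i * i ≤ m
    case neg =>
      simp only [if_neg h]
      constructor
      · intro hs; exact Or.inl hs
      · rintro (hs | ⟨j, hj, h1, h2, h3⟩)
        · exact hs
        · exfalso; nlinarith
    case pos =>
    have hfi : (m + 1 - (i + 1)).toNat ≤ fuel := by
      have : i ≤ m := by nlinarith
      omega
    simp only [if_pos h]
    by_cases hmod : PySem.Int.mod m i == 0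
    · simp only [if_pos hmod]
      rw [ih0 (i + 1) _ x (by omega) hfi]
      simp only [PySem.Set.mem_add]
      constructor
      · rintro (((hs | rfl) | rfl) | ⟨j, hj, h1, h2, h3⟩)
        · exact Or.inl hs
        · exact Or.inr ⟨x, le_refl x, h, by simpa using hmod, Or.inl rfl⟩
        · exact Or.inr ⟨i, le_refl i, h, by simpa using hmod, Or.inr rfl⟩
        · exact Or.inr ⟨j, by omega, h1, h2, h3⟩
      · rintro (hs | ⟨j, hj, h1, h2, h3⟩)
        · exact Or.inl (Or.inl (Or.inl hs))
        · rcases eq_or_lt_of_le hj with rfl | hlt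
          · rcases h3 with rfl | rfl
            · exact Or.inl (Or.inl (Or.inr rfl))
            · exact Or.inl (Or.inr rfl)
          · exact Or.inr ⟨j, by omega, h1, h2, h3⟩
    · simp only [if_neg hmod]
      rw [ih0 (i + 1) _ x (by omega) hfi]
      constructor
      · rintro (hs | ⟨j, hj, h1, h2, h3⟩)
        · exact Or.inl hs
        · exact Or.inr ⟨j, by omega, h1, h2, h3⟩
      · rintro (hs | ⟨j, hj, h1, h2, h3⟩)
        · exact Or.inl hs
        · rcases eq_or_lt_of_le hj with rfl | hlt
          · simp [h2] at hmod
          · exact Or.inr ⟨j, by omega, h1, h2, h3⟩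

theorem nodup_divLoop (m : Int) : ∀ (fuel : Nat) (i : Int) (s : PySem.Set Int),
    List.Nodup s → List.Nodup (divLoop m fuel i s) := by
  intro fuel
  induction fuel with
  | zero => intro i s hs; simpa [divLoop] using hs
  | succ fuel ih =>
    intro i s hs
    simp only [divLoop]
    split_ifs with h hmod
    · exact ih _ _ (PySem.Set.nodup_add _ _ (PySem.Set.nodup_add _ _ hs))
    · exact ih _ _ hs
    · exact hs

-- for 1 ≤ m the sqrt-loop's divisor pairs are exactly the divisors of m in [1, m]
theorem divisor_pair_char (m d : Int) (hm : 1 ≤ m) :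
    (∃ j, 1 ≤ j ∧ j * j ≤ m ∧ PySem.Int.mod m j = 0 ∧
       (d = j ∨ d = PySem.Int.floordiv m j)) ↔ (1 ≤ d ∧ d ≤ m ∧ PySem.Int.mod m d = 0) := by
  constructor
  · rintro ⟨j, hj1, hj2, hj3, rfl | rfl⟩
    · refine ⟨hj1, by nlinarith, hj3⟩
    · rw [PySem.Int.mod_eq_zero_iff_dvd] at hj3 ⊢
      rw [PySem.Int.floordiv_eq_ediv_of_pos (by omega)]
      obtain ⟨e, rfl⟩ := hj3
      rw [Int.mul_ediv_cancel_left _ (by omega)]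
      have he1 : 1 ≤ e := by nlinarith
      exact ⟨he1, by nlinarith, ⟨j, by ring⟩⟩
  · rintro ⟨hd1, hd2, hd3⟩
    rw [PySem.Int.mod_eq_zero_iff_dvd] at hd3
    obtain ⟨e, hme⟩ := hd3
    have he1 : 1 ≤ e := by nlinarith
    rcases le_or_gt (d * d) m with hsm | hsm
    · exact ⟨d, hd1, hsm, by rw [PySem.Int.mod_eq_zero_iff_dvd]; exact ⟨e, hme⟩, Or.inl rfl⟩
    · refine ⟨e, he1, by nlinarith, by rw [PySem.Int.mod_eq_zero_iff_dvd]; exact ⟨d, by linarith [hme]⟩, Or.inr ?_⟩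
      rw [PySem.Int.floordiv_eq_ediv_of_pos (by omega), hme, mul_comm, Int.mul_ediv_cancel_left _ (by omega)]

-- ===== VERDICT (by name: the statement is the Claim_ definition above) =====
theorem vsc_primes_spec : Claim_equal_vsc_primes := by
  intro k _
  show vsc_primes k = vsc_primes_alt k
  simp only [vsc_primes, vsc_primes_alt]
  set m := 2 * k with hm
  have hbody : (fun (acc : List Int) d =>
      if PySem.Int.mod m d == 0 then
        if isPrime (d + 1) then acc ++ [d + 1] else acc
      else acc)
    = (fun acc d => if (PySem.Int.mod m d == 0 && isPrime (d + 1)) then acc ++ [(fun d => d + 1) d] else acc) := by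
    funext acc d
    by_cases h1 : PySem.Int.mod m d == 0 <;> by_cases h2 : isPrime (d + 1) <;> simp [h1, h2]
  rw [hbody, PySem.List.foldl_append_if]
  apply PySem.List.sorted_eq_sorted_of_perm _ _ _ (fun a b h => h)
  rw [List.perm_ext_iff_of_nodup]
  · intro x
    simp only [PySem.Set.mem_ofList, List.nil_append, List.mem_map, List.mem_filter,
      PySem.List.mem_pyRange_one, beq_iff_eq, Bool.and_eq_true]
    constructor
    · rintro ⟨d, ⟨⟨hd1, hd2⟩, hmod, hp⟩, rfl⟩
      refine ⟨d, ⟨?_, hp⟩, rfl⟩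
      rw [mem_divLoop m _ 1 _ d (by omega) (by omega)]
      have hm1 : 1 ≤ m := by omega
      exact Or.inr ((divisor_pair_char m d hm1).mpr ⟨hd1, by omega, hmod⟩)
    · rintro ⟨d, ⟨hd, hp⟩, rfl⟩
      rw [mem_divLoop m _ 1 _ d (by omega) (by omega)] at hd
      rcases hd with hd | ⟨j, hj1, hj2, hj3, hj4⟩
      · simp [PySem.Set.empty] at hd
      · have hm1 : 1 ≤ m := by nlinarith
        have := (divisor_pair_char m d hm1).mp ⟨j, hj1, hj2, hj3, hj4⟩
        exact ⟨d, ⟨⟨this.1, by omega⟩, this.2.2, hp⟩, rfl⟩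
  · exact (PySem.Set.nodup_ofList _)
  · exact List.Nodup.map (fun a b h => by omega)
      (List.Nodup.filter _ (nodup_divLoop m _ 1 _ List.nodup_nil))
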